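-- pv_equiv track=rewrite | github.com/derekchased/book-ai | group_boxes.py | make_box_id
-- ===== SOURCE A (Python) =====
-- def make_box_id(books):
--     x = 0
--     ids = []
--     current = books[0]
--     for i in books:
--         if current != i:
--             x = 0
--         ids.append(x)
--         current = i
--         x+=1
--
--     return ids
-- ===== SOURCE B (Python) =====
-- def make_box_id(books):
--     out = []
--     rest = books
--     while rest:
--         k = 1
--         while k < len(rest) and rest[k] == rest[0]:
--             k += 1
--         out.extend(range(k))
--         rest = rest[k:]
--     return out
-- ===== Notes on version B (the rewrite author's own statement) =====
-- stated objective: alternative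
-- what changed: Replaces the single stateful reset-counter pass with a run-decomposition: peel off each maximal run of equal adjacent elements and emit 0..len(run)-1 for it.
import Mathlib
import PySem

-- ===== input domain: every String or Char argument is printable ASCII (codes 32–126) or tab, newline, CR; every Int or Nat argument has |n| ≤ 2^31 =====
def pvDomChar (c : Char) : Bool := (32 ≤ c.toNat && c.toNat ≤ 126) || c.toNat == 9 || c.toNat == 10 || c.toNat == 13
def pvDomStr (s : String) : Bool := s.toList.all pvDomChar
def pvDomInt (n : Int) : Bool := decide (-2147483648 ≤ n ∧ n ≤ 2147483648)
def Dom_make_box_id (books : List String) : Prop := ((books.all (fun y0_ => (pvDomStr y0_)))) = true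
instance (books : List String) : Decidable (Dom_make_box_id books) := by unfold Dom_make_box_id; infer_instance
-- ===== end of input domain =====

-- B decomposes the list into maximal runs of equal elements and emits 0..k-1 per run,
-- instead of A's single pass with a reset counter; same cost, alternative structure.

-- ===== PORT A =====
-- A's for-loop over books with state (x, ids, current); current starts as books[0]
-- (the Pre_ below excludes the empty list, on which books[0] raises IndexError).
def make_box_id (books : List String) : List Int :=
  (books.foldl
    (fun (s : Int × List Int × String) i =>
      let x := if s.2.2 ≠ i then (0 : Int) else s.1
      (x + 1, s.2.1 ++ [x], i))
    ((0 : Int), ([] : List Int), books.headD "")).2.1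

-- ===== PORT B =====
-- inner while: k counts how many elements after the head still equal the head
def pvRunLen (b : String) : List String → Nat
  | [] => 0
  | x :: t => if x == b then pvRunLen b t + 1 else 0

def make_box_id_alt : List String → List Int
  | [] => []
  | b :: t =>
    let m := pvRunLen b t
    (List.range (1 + m)).map (fun n => Int.ofNat n) ++ make_box_id_alt (List.drop m t)
termination_by l => l.length
decreasing_by simp

-- ===== PRECONDITION & SPEC =====
-- Pre_ excludes exactly the empty list, on which A raises IndexError at books[0].
def Pre_make_box_id (books : List String) : Prop := books ≠ []
instance (books : List String) : Decidable (Pre_make_box_id books) := by unfold Pre_make_box_id; infer_instance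
def pvWitness_make_box_id : List String := ["a", "a", "b"]

def Spec_make_box_id (books : List String) (out : List Int) : Prop := out = make_box_id_alt books
instance (books : List String) (out : List Int) : Decidable (Spec_make_box_id books out) := by unfold Spec_make_box_id; infer_instance

-- ===== CLAIM (what is proved, stated in full; the proofs are below) =====
def Claim_equal_make_box_id : Prop := ∀ (books : List String), Dom_make_box_id books → Pre_make_box_id books → Spec_make_box_id books (make_box_id books)
-- ===== LEMMAS AND PROOFS =====

-- A's loop body as structural recursion on the remaining input
def pvARun (x : Int) (cur : String) : List String → List Int
  | [] => []
  | i :: rest =>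
    let x' := if cur ≠ i then (0 : Int) else x
    x' :: pvARun (x' + 1) i rest

theorem pvFoldl_aRun (l : List String) : ∀ (x : Int) (acc : List Int) (cur : String),
    (l.foldl
      (fun (s : Int × List Int × String) i =>
        let x := if s.2.2 ≠ i then (0 : Int) else s.1
        (x + 1, s.2.1 ++ [x], i))
      (x, acc, cur)).2.1 = acc ++ pvARun x cur l := by
  induction l with
  | nil => intro x acc cur; simp [pvARun]
  | cons i rest ih =>
    intro x acc cur
    simp only [List.foldl_cons, pvARun, ih]
    by_cases h : cur = i <;> simp [h]

theorem pvARun_alt (t : List String) : ∀ (b : String) (x : Int),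
    pvARun x b t =
      (List.range (pvRunLen b t)).map (fun n : Nat => x + (n : Int)) ++
        make_box_id_alt (List.drop (pvRunLen b t) t) := by
  induction t with
  | nil => intro b x; simp [pvARun, pvRunLen, make_box_id_alt]
  | cons y t' ih =>
    intro b x
    by_cases h : b = y
    · subst h
      simp only [pvARun, pvRunLen, ite_not, beq_self_eq_true, if_true]
      rw [ih b (x + 1)]
      simp only [List.range_succ_eq_map, List.map_cons, List.map_map, List.drop_succ_cons,
        List.cons_append, Nat.cast_zero, add_zero]
      refine congrArg (x :: ·) (congrArg (· ++ _) ?_)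
      refine List.map_congr_left fun n _ => ?_
      show x + 1 + (n : Int) = x + (n + 1 : Nat)
      omega
    · have hb : (y == b) = false := beq_eq_false_iff_ne.mpr (fun e => h e.symm)
      simp only [pvARun, pvRunLen, hb, ite_not, if_neg h, Bool.false_eq_true, if_false,
        List.range_zero, List.map_nil, List.nil_append, List.drop_zero]
      rw [zero_add, ih y 1]
      conv_rhs => rw [make_box_id_alt]
      rw [Nat.add_comm 1 (pvRunLen y t')]
      simp only [List.range_succ_eq_map, List.map_cons, List.map_map,
        List.cons_append]
      refine congrArg ((0 : Int) :: ·) (congrArg (· ++ _) ?_)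
      refine List.map_congr_left fun n _ => ?_
      simp only [Function.comp_apply, Int.ofNat_eq_natCast]; omega

theorem make_box_id_spec : Claim_equal_make_box_id := by
  intro books _ hp
  unfold Spec_make_box_id
  cases books with
  | nil => exact absurd rfl hp
  | cons b t =>
    unfold make_box_id
    rw [pvFoldl_aRun]
    rw [List.nil_append, show (b :: t).headD "" = b from rfl]
    rw [pvARun_alt (b :: t) b 0]
    conv_rhs => rw [make_box_id_alt]
    rw [show pvRunLen b (b :: t) = pvRunLen b t + 1 from by simp [pvRunLen]]
    rw [Nat.add_comm 1 (pvRunLen b t), List.drop_succ_cons]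
    refine congrArg (· ++ _) (List.map_congr_left fun n _ => ?_)
    simp
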